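-- pv_equiv track=rewrite | github.com/ws8149/web-scraper | base-code-without-tool.py | getLevelFromTitle
-- ===== SOURCE A (Python) =====
-- level_key = {'FUG': ['Foundation'], 'VOC': ['Cert', 'CMT', 'CAS', 'Certificate', 'Credential', 'Credentials'],
--              'DIP': ['Diploma'], 'ADIP': ['Advance'],
--              'UG': [ 'B.S.', 'B.A.', 'B.S.B.A.', 'BS', 'Bachelor', 'B.Trad.', 'BGInS', 'BAcc', 'BAFM', 'BAdmin', 'BAS', 'BAA', 'BASc', 'BASc/BEd',
--                     'BArchSc', 'BAS', 'BA', 'BAS', 'BSN', 'BASc/BEd', 'BASc', 'BA/BComm', 'BA/BEd', 'BA/BEd/Dip', 'BA/LLB',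
--                     'BA/MA', 'BBRM', 'BBA', 'BEd', 'BCD', 'BBA/BA', 'BBA/BCS', 'BBA/BEd', 'BBA/BMath', 'BBA/BSc', 'BBE', 'BBTM',
--                     'BCogSc', 'BComm', 'BCom', 'BCoMS', 'BCoSc', 'BMT', 'BCS', 'BComp', 'BCmp', 'BCFM', 'BDes', 'BDEM',
--                     'BEcon', 'BEng', 'BEng&Mgt', 'BEngSoc', 'BAM', 'BESc', 'BEngTech', 'BEM', 'BESc', 'BESc/BEd', 'BES',
--                     'BES/BEd', 'BFAA', 'BFA,BFA/BEd', 'BFS', 'BGBDA', 'BHP', 'BHSc', 'BHSc', 'BHS', 'BHS/BEd',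
--                     'BHum', 'BHK', 'BHRM', 'BID', 'BINF', 'BIT', 'BID', 'BIB', 'BJ', 'BJour', 'BJourn', 'BJHum',
--                     'BKin', 'BK/BEd', 'BKI', 'BLA', 'BMOS', 'BMath', 'BMath/BEd', 'BMPD', 'BMRSc', 'BMSc', 'BMus',
--                     'MusBac', 'BMusA', 'BMus/BEd', 'BMuth', 'BOR', 'BOR/BA', 'BOR/BEd', 'BOR/BSc', 'BPHE', 'BPhEd',
--                     'BPHE/BEd', 'BPA', 'BPAPM', 'BPH', 'BRLS', 'BSc', 'BSc&Mgt', 'BSc/BASc', 'BSc/BComm', 'BSc/BEd',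
--                     'BSc(Eng)', 'BScFS', 'BScF', 'BSc(Kin)', 'BScN', 'BSocSc', 'BSW', 'BSE', 'BSM', 'BTech', 'BTh',
--                     'BURPI', 'iBA,iBA/BEd', 'iBBA', 'iBSc', 'iBSc/BEd'], 'GPG': ['Graduate Diploma', 'GDip', 'Post Baccalaureate Diploma'], 'GPC': ['Graduate Cert'],
--                     'PG': ['(Ed.S.)', 'Master', 'Postgrad', 'MPhil', 'MCD', 'MSc', 'LLM', 'MA', 'MSW', "Master's", 'Masters' ],
--                     'DPG': ['Doctor', 'PhD', 'Doctorate/PhD'],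
--                     'SHORT COURSES': ['Short', 'Course', 'Programme'], 'SEMINAR': ['Seminar'],
--                     'PRODEV': ['Tailor'], 'CONF': ['Conference'],
--                     'HONS': ['Honours','Honors'],
--                     'MINOR': ['Minor'],
--                     'PROGRAM' : ['Program','Programs'],
--                     'ASSOCIATE' : ['Associate']
--              }
--
-- def getLevelFromTitle(title):
--     # Levels
--     word = title.replace(':','')
--     lock = 0
--     for level, key in level_key.items():
--         for each in key:
--             for wd in word.split():
--                 if each.lower() == wd.lower():  # Testing the equal, might change back to in
--                     return level
--                     lock = 1
--                     break
--             if lock == 1: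
--                 break
--         if lock == 1:
--             break
--     return ""
-- ===== SOURCE B (Python) =====
-- # B: precomputed flat lowercased keyword -> level-ordinal index (first occurrence in
-- # level order wins), then a single pass over the title's words keeping the minimum
-- # ordinal; replaces A's nested level x keyword x word scan.
--
-- LEVELS = ['FUG', 'VOC', 'DIP', 'ADIP', 'UG', 'GPG', 'GPC', 'PG', 'DPG', 'SHORT COURSES', 'SEMINAR', 'PRODEV', 'CONF', 'HONS', 'MINOR', 'PROGRAM', 'ASSOCIATE']
--
-- KEYWORD_LEVEL = {
--     'foundation': 0,
--     'cert': 1,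
--     'cmt': 1,
--     'cas': 1,
--     'certificate': 1,
--     'credential': 1,
--     'credentials': 1,
--     'diploma': 2,
--     'advance': 3,
--     'b.s.': 4,
--     'b.a.': 4,
--     'b.s.b.a.': 4,
--     'bs': 4,
--     'bachelor': 4,
--     'b.trad.': 4,
--     'bgins': 4,
--     'bacc': 4,
--     'bafm': 4,
--     'badmin': 4,
--     'bas': 4,
--     'baa': 4,
--     'basc': 4,
--     'basc/bed': 4,
--     'barchsc': 4,
--     'ba': 4,
--     'bsn': 4,
--     'ba/bcomm': 4,
--     'ba/bed': 4,
--     'ba/bed/dip': 4,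
--     'ba/llb': 4,
--     'ba/ma': 4,
--     'bbrm': 4,
--     'bba': 4,
--     'bed': 4,
--     'bcd': 4,
--     'bba/ba': 4,
--     'bba/bcs': 4,
--     'bba/bed': 4,
--     'bba/bmath': 4,
--     'bba/bsc': 4,
--     'bbe': 4,
--     'bbtm': 4,
--     'bcogsc': 4,
--     'bcomm': 4,
--     'bcom': 4,
--     'bcoms': 4,
--     'bcosc': 4,
--     'bmt': 4,
--     'bcs': 4,
--     'bcomp': 4,
--     'bcmp': 4,
--     'bcfm': 4,
--     'bdes': 4,
--     'bdem': 4,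
--     'becon': 4,
--     'beng': 4,
--     'beng&mgt': 4,
--     'bengsoc': 4,
--     'bam': 4,
--     'besc': 4,
--     'bengtech': 4,
--     'bem': 4,
--     'besc/bed': 4,
--     'bes': 4,
--     'bes/bed': 4,
--     'bfaa': 4,
--     'bfa,bfa/bed': 4,
--     'bfs': 4,
--     'bgbda': 4,
--     'bhp': 4,
--     'bhsc': 4,
--     'bhs': 4,
--     'bhs/bed': 4,
--     'bhum': 4,
--     'bhk': 4,
--     'bhrm': 4,
--     'bid': 4,
--     'binf': 4,
--     'bit': 4,
--     'bib': 4,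
--     'bj': 4,
--     'bjour': 4,
--     'bjourn': 4,
--     'bjhum': 4,
--     'bkin': 4,
--     'bk/bed': 4,
--     'bki': 4,
--     'bla': 4,
--     'bmos': 4,
--     'bmath': 4,
--     'bmath/bed': 4,
--     'bmpd': 4,
--     'bmrsc': 4,
--     'bmsc': 4,
--     'bmus': 4,
--     'musbac': 4,
--     'bmusa': 4,
--     'bmus/bed': 4,
--     'bmuth': 4,
--     'bor': 4,
--     'bor/ba': 4,
--     'bor/bed': 4,
--     'bor/bsc': 4,
--     'bphe': 4,
--     'bphed': 4,
--     'bphe/bed': 4,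
--     'bpa': 4,
--     'bpapm': 4,
--     'bph': 4,
--     'brls': 4,
--     'bsc': 4,
--     'bsc&mgt': 4,
--     'bsc/basc': 4,
--     'bsc/bcomm': 4,
--     'bsc/bed': 4,
--     'bsc(eng)': 4,
--     'bscfs': 4,
--     'bscf': 4,
--     'bsc(kin)': 4,
--     'bscn': 4,
--     'bsocsc': 4,
--     'bsw': 4,
--     'bse': 4,
--     'bsm': 4,
--     'btech': 4,
--     'bth': 4,
--     'burpi': 4,
--     'iba,iba/bed': 4,
--     'ibba': 4,
--     'ibsc': 4,
--     'ibsc/bed': 4,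
--     'graduate diploma': 5,
--     'gdip': 5,
--     'post baccalaureate diploma': 5,
--     'graduate cert': 6,
--     '(ed.s.)': 7,
--     'master': 7,
--     'postgrad': 7,
--     'mphil': 7,
--     'mcd': 7,
--     'msc': 7,
--     'llm': 7,
--     'ma': 7,
--     'msw': 7,
--     "master's": 7,
--     'masters': 7,
--     'doctor': 8,
--     'phd': 8,
--     'doctorate/phd': 8,
--     'short': 9,
--     'course': 9,
--     'programme': 9,
--     'seminar': 10,
--     'tailor': 11,
--     'conference': 12,
--     'honours': 13,
--     'honors': 13,
--     'minor': 14,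
--     'program': 15,
--     'programs': 15,
--     'associate': 16,
-- }
--
-- def getLevelFromTitle(title):
--     best = None
--     for wd in title.replace(':', '').split():
--         j = KEYWORD_LEVEL.get(wd.lower())
--         if j is not None and (best is None or j < best):
--             best = j
--     return LEVELS[best] if best is not None else ""
-- ===== Notes on version B (the rewrite author's own statement) =====
-- stated objective: faster
-- what changed: Replaces A's nested level x keyword x word scan (with early return on the first matching level) by a precomputed flat lowercased keyword-to-level-ordinal dict plus one minimum-tracking pass over the title's words.
import Mathlib
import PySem

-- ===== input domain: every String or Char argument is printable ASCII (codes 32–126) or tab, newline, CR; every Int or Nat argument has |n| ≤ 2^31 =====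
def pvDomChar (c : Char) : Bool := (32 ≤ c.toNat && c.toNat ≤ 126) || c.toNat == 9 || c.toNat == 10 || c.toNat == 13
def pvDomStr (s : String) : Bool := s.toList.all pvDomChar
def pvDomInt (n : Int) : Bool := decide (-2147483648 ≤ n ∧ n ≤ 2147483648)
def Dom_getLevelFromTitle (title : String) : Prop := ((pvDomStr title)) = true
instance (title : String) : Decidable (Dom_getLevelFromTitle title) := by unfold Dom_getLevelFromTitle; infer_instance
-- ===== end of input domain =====

-- ===== PORT A =====
-- B replaces A's nested level x keyword x word scan by a precomputed flat lowercased
-- keyword -> level-ordinal table and one minimum-tracking pass over the title's words (objective: faster, measured).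
def levelKey : List (String × List String) := [
  ("FUG", ["Foundation"]),
  ("VOC", ["Cert", "CMT", "CAS", "Certificate", "Credential", "Credentials"]),
  ("DIP", ["Diploma"]),
  ("ADIP", ["Advance"]),
  ("UG", ["B.S.", "B.A.", "B.S.B.A.", "BS", "Bachelor", "B.Trad.", "BGInS", "BAcc", "BAFM", "BAdmin", "BAS", "BAA", "BASc", "BASc/BEd", "BArchSc", "BAS", "BA", "BAS", "BSN", "BASc/BEd", "BASc", "BA/BComm", "BA/BEd", "BA/BEd/Dip", "BA/LLB", "BA/MA", "BBRM", "BBA", "BEd", "BCD", "BBA/BA", "BBA/BCS", "BBA/BEd", "BBA/BMath", "BBA/BSc", "BBE", "BBTM", "BCogSc", "BComm", "BCom", "BCoMS", "BCoSc", "BMT", "BCS", "BComp", "BCmp", "BCFM", "BDes", "BDEM", "BEcon", "BEng", "BEng&Mgt", "BEngSoc", "BAM", "BESc", "BEngTech", "BEM", "BESc", "BESc/BEd", "BES", "BES/BEd", "BFAA", "BFA,BFA/BEd", "BFS", "BGBDA", "BHP", "BHSc", "BHSc", "BHS", "BHS/BEd", "BHum", "BHK", "BHRM", "BID", "BINF",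 "BIT", "BID", "BIB", "BJ", "BJour", "BJourn", "BJHum", "BKin", "BK/BEd", "BKI", "BLA", "BMOS", "BMath", "BMath/BEd", "BMPD", "BMRSc", "BMSc", "BMus", "MusBac", "BMusA", "BMus/BEd", "BMuth", "BOR", "BOR/BA", "BOR/BEd", "BOR/BSc", "BPHE", "BPhEd", "BPHE/BEd", "BPA", "BPAPM", "BPH", "BRLS", "BSc", "BSc&Mgt", "BSc/BASc", "BSc/BComm", "BSc/BEd", "BSc(Eng)", "BScFS", "BScF", "BSc(Kin)", "BScN", "BSocSc", "BSW", "BSE", "BSM", "BTech", "BTh", "BURPI", "iBA,iBA/BEd", "iBBA", "iBSc", "iBSc/BEd"]),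
  ("GPG", ["Graduate Diploma", "GDip", "Post Baccalaureate Diploma"]),
  ("GPC", ["Graduate Cert"]),
  ("PG", ["(Ed.S.)", "Master", "Postgrad", "MPhil", "MCD", "MSc", "LLM", "MA", "MSW", "Master's", "Masters"]),
  ("DPG", ["Doctor", "PhD", "Doctorate/PhD"]),
  ("SHORT COURSES", ["Short", "Course", "Programme"]),
  ("SEMINAR", ["Seminar"]),
  ("PRODEV", ["Tailor"]),
  ("CONF", ["Conference"]),
  ("HONS", ["Honours", "Honors"]),
  ("MINOR", ["Minor"]),
  ("PROGRAM", ["Program", "Programs"]),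
  ("ASSOCIATE", ["Associate"])]

-- for wd in word.split(): if each.lower() == wd.lower(): return (inner loop of A)
def pvA_wordMatch (each : String) : List String → Bool
  | [] => false
  | wd :: rest =>
    if PySem.Str.lower each == PySem.Str.lower wd then true else pvA_wordMatch each rest

-- for each in key: … (middle loop of A)
def pvA_keyMatch (keys : List String) (words : List String) : Bool :=
  match keys with
  | [] => false
  | each :: rest => if pvA_wordMatch each words then true else pvA_keyMatch rest words

-- for level, key in level_key.items(): … (outer loop of A; 'return level' on a hit)
def pvA_levels (pairs : List (String × List String)) (words : List String) : String :=
  match pairs with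
  | [] => ""
  | (level, key) :: rest => if pvA_keyMatch key words then level else pvA_levels rest words

def getLevelFromTitle (title : String) : String :=
  let word := PySem.Str.replace title ":" ""
  pvA_levels levelKey (PySem.Str.split₀ word)

-- ===== PORT B =====
-- Source B's module-level LEVELS list and its precomputed KEYWORD_LEVEL dict literal
-- (distinct keys, so a first-match association scan is exactly dict.get)
def pvLevels : List String := ["FUG", "VOC", "DIP", "ADIP", "UG", "GPG", "GPC", "PG", "DPG", "SHORT COURSES", "SEMINAR", "PRODEV", "CONF", "HONS", "MINOR", "PROGRAM", "ASSOCIATE"]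

def pvKwIndex : List (String × Nat) := [
  ("foundation", 0),
  ("cert", 1),
  ("cmt", 1),
  ("cas", 1),
  ("certificate", 1),
  ("credential", 1),
  ("credentials", 1),
  ("diploma", 2),
  ("advance", 3),
  ("b.s.", 4),
  ("b.a.", 4),
  ("b.s.b.a.", 4),
  ("bs", 4),
  ("bachelor", 4),
  ("b.trad.", 4),
  ("bgins", 4),
  ("bacc", 4),
  ("bafm", 4),
  ("badmin", 4),
  ("bas", 4),
  ("baa", 4),
  ("basc", 4),
  ("basc/bed", 4),
  ("barchsc", 4),
  ("ba", 4),
  ("bsn", 4),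
  ("ba/bcomm", 4),
  ("ba/bed", 4),
  ("ba/bed/dip", 4),
  ("ba/llb", 4),
  ("ba/ma", 4),
  ("bbrm", 4),
  ("bba", 4),
  ("bed", 4),
  ("bcd", 4),
  ("bba/ba", 4),
  ("bba/bcs", 4),
  ("bba/bed", 4),
  ("bba/bmath", 4),
  ("bba/bsc", 4),
  ("bbe", 4),
  ("bbtm", 4),
  ("bcogsc", 4),
  ("bcomm", 4),
  ("bcom", 4),
  ("bcoms", 4),
  ("bcosc", 4),
  ("bmt", 4),
  ("bcs", 4),
  ("bcomp", 4),
  ("bcmp", 4),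
  ("bcfm", 4),
  ("bdes", 4),
  ("bdem", 4),
  ("becon", 4),
  ("beng", 4),
  ("beng&mgt", 4),
  ("bengsoc", 4),
  ("bam", 4),
  ("besc", 4),
  ("bengtech", 4),
  ("bem", 4),
  ("besc/bed", 4),
  ("bes", 4),
  ("bes/bed", 4),
  ("bfaa", 4),
  ("bfa,bfa/bed", 4),
  ("bfs", 4),
  ("bgbda", 4),
  ("bhp", 4),
  ("bhsc", 4),
  ("bhs", 4),
  ("bhs/bed", 4),
  ("bhum", 4),
  ("bhk", 4),
  ("bhrm", 4),
  ("bid", 4),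
  ("binf", 4),
  ("bit", 4),
  ("bib", 4),
  ("bj", 4),
  ("bjour", 4),
  ("bjourn", 4),
  ("bjhum", 4),
  ("bkin", 4),
  ("bk/bed", 4),
  ("bki", 4),
  ("bla", 4),
  ("bmos", 4),
  ("bmath", 4),
  ("bmath/bed", 4),
  ("bmpd", 4),
  ("bmrsc", 4),
  ("bmsc", 4),
  ("bmus", 4),
  ("musbac", 4),
  ("bmusa", 4),
  ("bmus/bed", 4),
  ("bmuth", 4),
  ("bor", 4),
  ("bor/ba", 4),
  ("bor/bed", 4),
  ("bor/bsc", 4),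
  ("bphe", 4),
  ("bphed", 4),
  ("bphe/bed", 4),
  ("bpa", 4),
  ("bpapm", 4),
  ("bph", 4),
  ("brls", 4),
  ("bsc", 4),
  ("bsc&mgt", 4),
  ("bsc/basc", 4),
  ("bsc/bcomm", 4),
  ("bsc/bed", 4),
  ("bsc(eng)", 4),
  ("bscfs", 4),
  ("bscf", 4),
  ("bsc(kin)", 4),
  ("bscn", 4),
  ("bsocsc", 4),
  ("bsw", 4),
  ("bse", 4),
  ("bsm", 4),
  ("btech", 4),
  ("bth", 4),
  ("burpi", 4),
  ("iba,iba/bed", 4),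
  ("ibba", 4),
  ("ibsc", 4),
  ("ibsc/bed", 4),
  ("graduate diploma", 5),
  ("gdip", 5),
  ("post baccalaureate diploma", 5),
  ("graduate cert", 6),
  ("(ed.s.)", 7),
  ("master", 7),
  ("postgrad", 7),
  ("mphil", 7),
  ("mcd", 7),
  ("msc", 7),
  ("llm", 7),
  ("ma", 7),
  ("msw", 7),
  ("master's", 7),
  ("masters", 7),
  ("doctor", 8),
  ("phd", 8),
  ("doctorate/phd", 8),
  ("short", 9),
  ("course", 9),
  ("programme", 9),
  ("seminar", 10),
  ("tailor", 11),
  ("conference", 12),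
  ("honours", 13),
  ("honors", 13),
  ("minor", 14),
  ("program", 15),
  ("programs", 15),
  ("associate", 16)]

-- KEYWORD_LEVEL.get(w): first-match lookup in the literal table (keys are distinct)
def pvGetKw : List (String × Nat) → String → Option Nat
  | [], _ => none
  | (k, v) :: rest, s => if k == s then some v else pvGetKw rest s

-- the update of 'best' for one word (the if in B's loop)
def pvB_step (j best : Option Nat) : Option Nat :=
  match j, best with
  | some j, none => some j
  | some j, some m => if j < m then some j else some m
  | none, b => b

-- B's single pass over the words, keeping the minimum level ordinal seen
def pvBestLoop : List String → Option Nat → Option Nat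
  | [], best => best
  | wd :: rest, best => pvBestLoop rest (pvB_step (pvGetKw pvKwIndex (PySem.Str.lower wd)) best)

-- LEVELS[best]: best is always < 17 when set, so pyGet?.getD "" is exact here
def getLevelFromTitle_alt (title : String) : String :=
  match pvBestLoop (PySem.Str.split₀ (PySem.Str.replace title ":" "")) none with
  | none => ""
  | some j => (PySem.List.pyGet? pvLevels (j : Int)).getD ""

-- ===== PRECONDITION & SPEC =====
def Spec_getLevelFromTitle (title : String) (out : String) : Prop := out = getLevelFromTitle_alt title
instance (title : String) (out : String) : Decidable (Spec_getLevelFromTitle title out) := by unfold Spec_getLevelFromTitle; infer_instance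

-- ===== CLAIM (what is proved, stated in full; the proofs are below) =====
def Claim_equal_getLevelFromTitle : Prop := ∀ (title : String), Dom_getLevelFromTitle title → Spec_getLevelFromTitle title (getLevelFromTitle title)

-- ===== LEMMAS AND PROOFS =====

-- a word s hits a level (lv, ks) iff some keyword of ks equals it case-insensitively
def pvHit (s : String) (p : String × List String) : Bool :=
  p.2.any (fun k => PySem.Str.lower k == s)

-- the flat (lowercased keyword, level ordinal) list, in level order
def pvFlatten : List (String × List String) → Nat → List (String × Nat)
  | [], _ => []
  | (_, ks) :: rest, i => ks.map (fun k => (PySem.Str.lower k, i)) ++ pvFlatten rest (i + 1)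

-- keep the first occurrence of each key
def pvDedup : List (String × Nat) → List String → List (String × Nat)
  | [], _ => []
  | (k, v) :: rest, seen =>
    if k ∈ seen then pvDedup rest seen else (k, v) :: pvDedup rest (k :: seen)

set_option maxRecDepth 100000 in
theorem pvKwIndex_eq : pvKwIndex = pvDedup (pvFlatten levelKey 0) [] := by decide

theorem pvLevels_eq : pvLevels = levelKey.map Prod.fst := by decide

theorem pvGetKw_dedup (xs : List (String × Nat)) (seen : List String) (s : String)
    (hs : s ∉ seen) : pvGetKw (pvDedup xs seen) s = pvGetKw xs s := by
  induction xs generalizing seen with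
  | nil => rfl
  | cons p rest ih =>
      obtain ⟨k, v⟩ := p
      simp only [pvDedup]
      split_ifs with hk
      · have hne : k ≠ s := fun h => hs (h ▸ hk)
        rw [ih seen hs]
        simp [pvGetKw, hne]
      · by_cases he : k = s
        · subst he; simp [pvGetKw]
        · simp only [pvGetKw, beq_iff_eq, if_neg he]
          refine ih (k :: seen) ?_
          intro hm
          rcases List.mem_cons.mp hm with h | h
          · exact he h.symm
          · exact hs h

theorem pvGetKw_append (xs ys : List (String × Nat)) (s : String) :
    pvGetKw (xs ++ ys) s = (pvGetKw xs s).or (pvGetKw ys s) := by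
  induction xs with
  | nil => simp [pvGetKw]
  | cons p rest ih =>
      obtain ⟨k, v⟩ := p
      simp only [List.cons_append, pvGetKw, ih]
      split_ifs <;> simp [Option.or]

theorem pvGetKw_block (ks : List String) (i : Nat) (s : String) :
    pvGetKw (ks.map (fun k => (PySem.Str.lower k, i))) s =
      if ks.any (fun k => PySem.Str.lower k == s) then some i else none := by
  induction ks with
  | nil => simp [pvGetKw]
  | cons k rest ih =>
      simp only [List.map_cons, pvGetKw, List.any_cons, beq_iff_eq, ih]
      by_cases h1 : PySem.Str.lower k = s <;> simp [h1]

theorem pvGetKw_flatten (L : List (String × List String)) (i : Nat) (s : String) :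
    pvGetKw (pvFlatten L i) s = (L.findIdx? (pvHit s)).map (fun j => i + j) := by
  induction L generalizing i with
  | nil => simp [pvFlatten, pvGetKw]
  | cons p rest ih =>
      obtain ⟨lv, ks⟩ := p
      simp only [pvFlatten, pvGetKw_append, pvGetKw_block, List.findIdx?_cons, ih]
      by_cases h : pvHit s (lv, ks) = true
      · have hb : (ks.any fun k => PySem.Str.lower k == s) = true := by simpa [pvHit] using h
        simp [h, hb, Option.or]
      · have hb : (ks.any fun k => PySem.Str.lower k == s) = false := by simpa [pvHit] using h
        cases hf : List.findIdx? (pvHit s) rest <;> simp [h, hb, Option.or]; omega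

theorem pvLookup_eq (s : String) :
    pvGetKw pvKwIndex s = levelKey.findIdx? (pvHit s) := by
  rw [pvKwIndex_eq, pvGetKw_dedup _ _ _ (List.not_mem_nil), pvGetKw_flatten]
  cases hf : levelKey.findIdx? (pvHit s) <;> simp

theorem pvA_wordMatch_iff (each : String) (W : List String) :
    pvA_wordMatch each W = true ↔ ∃ wd ∈ W, PySem.Str.lower each = PySem.Str.lower wd := by
  induction W with
  | nil => simp [pvA_wordMatch]
  | cons w ws ih =>
      simp only [pvA_wordMatch, beq_iff_eq]
      split_ifs with h
      · exact iff_of_true rfl ⟨w, List.mem_cons_self, h⟩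
      · rw [ih]
        constructor
        · rintro ⟨wd, hm, he⟩; exact ⟨wd, List.mem_cons_of_mem _ hm, he⟩
        · rintro ⟨wd, hm, he⟩
          rcases List.mem_cons.mp hm with rfl | hm
          · exact absurd he h
          · exact ⟨wd, hm, he⟩

theorem pvA_keyMatch_iff (lv : String) (keys W : List String) :
    pvA_keyMatch keys W = true ↔ ∃ w ∈ W, pvHit (PySem.Str.lower w) (lv, keys) = true := by
  have hhit : ∀ (w : String) (ks : List String),
      pvHit (PySem.Str.lower w) (lv, ks) = true ↔
        ∃ k ∈ ks, PySem.Str.lower k = PySem.Str.lower w := by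
    intro w ks
    simp [pvHit, List.any_eq_true, beq_iff_eq]
  induction keys with
  | nil => simp [pvA_keyMatch, hhit]
  | cons k ks ih =>
      simp only [pvA_keyMatch]
      split_ifs with h
      · obtain ⟨wd, hm, he⟩ := (pvA_wordMatch_iff k W).mp h
        exact iff_of_true rfl ⟨wd, hm, (hhit wd (k :: ks)).mpr ⟨k, List.mem_cons_self, he⟩⟩
      · refine ih.trans ⟨?_, ?_⟩
        · rintro ⟨w, hw, hh⟩
          obtain ⟨k', hk', he'⟩ := (hhit w ks).mp hh
          exact ⟨w, hw, (hhit w (k :: ks)).mpr ⟨k', List.mem_cons_of_mem _ hk', he'⟩⟩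
        · rintro ⟨w, hw, hh⟩
          obtain ⟨k', hk', he'⟩ := (hhit w (k :: ks)).mp hh
          rcases List.mem_cons.mp hk' with hk | hk'
          · exact absurd ((pvA_wordMatch_iff k W).mpr ⟨w, hw, hk ▸ he'⟩) h
          · exact ⟨w, hw, (hhit w ks).mpr ⟨k', hk', he'⟩⟩

theorem pvBestLoop_none (W : List String) (b : Option Nat) :
    pvBestLoop W b = none ↔ b = none ∧ ∀ w ∈ W, pvGetKw pvKwIndex (PySem.Str.lower w) = none := by
  induction W generalizing b with
  | nil => simp [pvBestLoop]
  | cons w ws ih =>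
      simp only [pvBestLoop, ih]
      cases hg : pvGetKw pvKwIndex (PySem.Str.lower w) with
      | none => simp [pvB_step, hg]
      | some a =>
          cases b with
          | none => simp [pvB_step, hg]
          | some m =>
              simp only [pvB_step, List.forall_mem_cons, hg]
              split_ifs <;> simp

theorem pvBestLoop_some (W : List String) (b : Option Nat) (j : Nat)
    (h : pvBestLoop W b = some j) :
    (b = some j ∨ ∃ w ∈ W, pvGetKw pvKwIndex (PySem.Str.lower w) = some j) ∧
    (∀ v, b = some v → j ≤ v) ∧
    (∀ w ∈ W, ∀ v, pvGetKw pvKwIndex (PySem.Str.lower w) = some v → j ≤ v) := by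
  induction W generalizing b with
  | nil =>
      simp only [pvBestLoop] at h
      exact ⟨Or.inl h, fun v hv => by rw [h] at hv; injection hv with hv; omega, by simp⟩
  | cons w ws ih =>
      simp only [pvBestLoop] at h
      obtain ⟨h1, h2, h3⟩ := ih _ h
      cases hg : pvGetKw pvKwIndex (PySem.Str.lower w) with
      | none =>
          simp only [hg, pvB_step] at h1 h2
          refine ⟨?_, h2, ?_⟩
          · rcases h1 with h1 | ⟨u, hu, hv⟩
            · exact Or.inl h1
            · exact Or.inr ⟨u, List.mem_cons_of_mem _ hu, hv⟩
          · intro u hu v hv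
            rcases List.mem_cons.mp hu with rfl | hu
            · rw [hg] at hv; cases hv
            · exact h3 u hu v hv
      | some a =>
          simp only [hg] at h1 h2
          cases b with
          | none =>
              simp only [pvB_step] at h1 h2
              refine ⟨Or.inr ?_, by simp, ?_⟩
              · rcases h1 with h1 | ⟨u, hu, hv⟩
                · injection h1 with h1
                  exact ⟨w, List.mem_cons_self, by rw [hg, h1]⟩
                · exact ⟨u, List.mem_cons_of_mem _ hu, hv⟩
              · intro u hu v hv
                rcases List.mem_cons.mp hu with rfl | hu
                · rw [hg] at hv; injection hv with hv
                  have := h2 a rfl; omega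
                · exact h3 u hu v hv
          | some m =>
              simp only [pvB_step] at h1 h2
              by_cases ham : a < m
              · rw [if_pos ham] at h1 h2
                have hja : j ≤ a := h2 a rfl
                refine ⟨?_, fun v hv => by injection hv with hv; omega, ?_⟩
                · rcases h1 with h1 | ⟨u, hu, hv⟩
                  · injection h1 with h1
                    exact Or.inr ⟨w, List.mem_cons_self, by rw [hg, h1]⟩
                  · exact Or.inr ⟨u, List.mem_cons_of_mem _ hu, hv⟩
                · intro u hu v hv
                  rcases List.mem_cons.mp hu with rfl | hu
                  · rw [hg] at hv; injection hv with hv; omega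
                  · exact h3 u hu v hv
              · rw [if_neg ham] at h1 h2
                have hjm : j ≤ m := h2 m rfl
                refine ⟨?_, fun v hv => by injection hv with hv; omega, ?_⟩
                · rcases h1 with h1 | ⟨u, hu, hv⟩
                  · injection h1 with h1
                    exact Or.inl (by rw [h1])
                  · exact Or.inr ⟨u, List.mem_cons_of_mem _ hu, hv⟩
                · intro u hu v hv
                  rcases List.mem_cons.mp hu with rfl | hu
                  · rw [hg] at hv; injection hv with hv
                    have := h3
                    omega
                  · exact h3 u hu v hv

theorem pvA_levels_none (L : List (String × List String)) (W : List String)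
    (h : ∀ w ∈ W, L.findIdx? (pvHit (PySem.Str.lower w)) = none) :
    pvA_levels L W = "" := by
  induction L with
  | nil => rfl
  | cons p rest ih =>
      obtain ⟨lv, ks⟩ := p
      have hsplit : ∀ w ∈ W, pvHit (PySem.Str.lower w) (lv, ks) = false ∧
          rest.findIdx? (pvHit (PySem.Str.lower w)) = none := by
        intro w hw
        have := h w hw
        rw [List.findIdx?_cons] at this
        by_cases hp : pvHit (PySem.Str.lower w) (lv, ks) = true
        · rw [if_pos hp] at this; cases this
        · refine ⟨by simpa using hp, ?_⟩
          rw [if_neg hp] at this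
          exact Option.map_eq_none_iff.mp this
      simp only [pvA_levels]
      have hk : pvA_keyMatch ks W = false := by
        by_contra hc
        have hk' : pvA_keyMatch ks W = true := by
          cases hx : pvA_keyMatch ks W
          · exact absurd hx hc
          · rfl
        obtain ⟨w, hw, hh⟩ := (pvA_keyMatch_iff lv ks W).mp hk'
        rw [(hsplit w hw).1] at hh; cases hh
      rw [hk]
      simp only [Bool.false_eq_true, if_false]
      exact ih (fun w hw => (hsplit w hw).2)

theorem pvA_levels_some (L : List (String × List String)) (W : List String) (j : Nat)
    (hex : ∃ w ∈ W, L.findIdx? (pvHit (PySem.Str.lower w)) = some j)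
    (hmin : ∀ w ∈ W, ∀ v, L.findIdx? (pvHit (PySem.Str.lower w)) = some v → j ≤ v) :
    pvA_levels L W = ((L.map Prod.fst)[j]?).getD "" := by
  induction L generalizing j with
  | nil => obtain ⟨w, _, hw⟩ := hex; cases hw
  | cons p rest ih =>
      obtain ⟨lv, ks⟩ := p
      simp only [pvA_levels]
      by_cases hk : pvA_keyMatch ks W = true
      · obtain ⟨w, hw, hh⟩ := (pvA_keyMatch_iff lv ks W).mp hk
        have h0 : ((lv, ks) :: rest).findIdx? (pvHit (PySem.Str.lower w)) = some 0 := by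
          rw [List.findIdx?_cons, if_pos hh]
        have hj0 : j = 0 := Nat.le_zero.mp (hmin w hw 0 h0)
        subst hj0
        simp [hk]
      · have hk' : pvA_keyMatch ks W = false := by
          cases hx : pvA_keyMatch ks W
          · rfl
          · exact absurd hx hk
        have hnohit : ∀ w ∈ W, pvHit (PySem.Str.lower w) (lv, ks) = false := by
          intro w hw
          by_cases hp : pvHit (PySem.Str.lower w) (lv, ks) = true
          · exact absurd ((pvA_keyMatch_iff lv ks W).mpr ⟨w, hw, hp⟩) (by simp [hk'])
          · simpa using hp
        have hcons : ∀ w ∈ W, ((lv, ks) :: rest).findIdx? (pvHit (PySem.Str.lower w)) =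
            (rest.findIdx? (pvHit (PySem.Str.lower w))).map (· + 1) := by
          intro w hw
          rw [List.findIdx?_cons, if_neg (by simp [hnohit w hw])]
        obtain ⟨w, hw, hj⟩ := hex
        rw [hcons w hw] at hj
        obtain ⟨j', hj', rfl⟩ := Option.map_eq_some_iff.mp hj
        have hex' : ∃ w ∈ W, rest.findIdx? (pvHit (PySem.Str.lower w)) = some j' := ⟨w, hw, hj'⟩
        have hmin' : ∀ w ∈ W, ∀ v, rest.findIdx? (pvHit (PySem.Str.lower w)) = some v → j' ≤ v := by
          intro u hu v hv
          have := hmin u hu (v + 1) (by rw [hcons u hu, hv]; rfl)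
          omega
        rw [hk']
        simp only [Bool.false_eq_true, if_false]
        rw [ih j' hex' hmin']
        simp

theorem pv_main (W : List String) :
    (match pvBestLoop W none with
     | none => ""
     | some j => (PySem.List.pyGet? pvLevels (j : Int)).getD "") = pvA_levels levelKey W := by
  cases hb : pvBestLoop W none with
  | none =>
      have hnone := ((pvBestLoop_none W none).mp hb).2
      rw [pvA_levels_none levelKey W (fun w hw => by rw [← pvLookup_eq]; exact hnone w hw)]
  | some j =>
      obtain ⟨h1, _, h3⟩ := pvBestLoop_some W none j hb
      have hex : ∃ w ∈ W, levelKey.findIdx? (pvHit (PySem.Str.lower w)) = some j := by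
        rcases h1 with h1 | ⟨u, hu, hv⟩
        · cases h1
        · exact ⟨u, hu, by rw [← pvLookup_eq]; exact hv⟩
      have hmin : ∀ w ∈ W, ∀ v, levelKey.findIdx? (pvHit (PySem.Str.lower w)) = some v → j ≤ v := by
        intro w hw v hv
        exact h3 w hw v (by rw [pvLookup_eq]; exact hv)
      rw [pvA_levels_some levelKey W j hex hmin, pvLevels_eq.symm]
      simp only [PySem.List.pyGet?_natCast]

-- ===== VERDICT (by name: the statement is the Claim_ definition above) =====
theorem getLevelFromTitle_spec : Claim_equal_getLevelFromTitle := by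
  intro title _
  unfold Spec_getLevelFromTitle getLevelFromTitle getLevelFromTitle_alt
  exact (pv_main _).symm
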